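-- pv_equiv track=rewrite | github.com/hreynolds95/policy-rationalization | src/compliance_rationalizer/ingest.py | _select_title_column
-- ===== SOURCE A (Python) =====
-- def _select_title_column(fieldnames: list[str]) -> str | None:
--     preferred = (
--         "title",
--         "document_name",
--         "policy_name",
--         "policy",
--         "name",
--         "id",
--     )
--     lowered = {name.lower(): name for name in fieldnames}
--     for key in preferred:
--         if key in lowered:
--             return lowered[key]
--     return None
-- ===== SOURCE B (Python) =====
-- def _select_title_column(fieldnames: list[str]) -> str | None:
--     preferred = (
--         "title",
--         "document_name",
--         "policy_name",
--         "policy",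
--         "name",
--         "id",
--     )
--     rank = {key: i for i, key in enumerate(preferred)}
--     best_rank = len(preferred)
--     best_name = None
--     for name in fieldnames:
--         r = rank.get(name.lower())
--         if r is not None and r <= best_rank:
--             best_rank = r
--             best_name = name
--     return best_name
-- ===== Notes on version B (the rewrite author's own statement) =====
-- stated objective: alternative
-- what changed: Instead of building a lowered->original dict over all fieldnames and then scanning the preferred tuple, B builds a fixed key->priority map once and makes a single pass over fieldnames keeping the best-ranked match so far (<= keeps the last occurrence, matching the dict's last-wins behavior).
import Mathlib
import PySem

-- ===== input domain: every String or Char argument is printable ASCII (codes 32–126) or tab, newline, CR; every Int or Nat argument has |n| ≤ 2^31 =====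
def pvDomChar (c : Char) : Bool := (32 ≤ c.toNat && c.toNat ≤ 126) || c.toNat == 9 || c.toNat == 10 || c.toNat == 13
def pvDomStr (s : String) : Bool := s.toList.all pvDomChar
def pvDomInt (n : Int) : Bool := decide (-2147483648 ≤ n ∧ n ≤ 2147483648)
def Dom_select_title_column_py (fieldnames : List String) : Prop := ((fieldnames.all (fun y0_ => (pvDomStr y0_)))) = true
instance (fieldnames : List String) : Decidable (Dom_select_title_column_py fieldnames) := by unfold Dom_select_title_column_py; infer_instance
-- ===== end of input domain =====

-- B replaces A's lowered->original dict + scan of the preferred tuple by one pass over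
-- fieldnames keeping the best-ranked match so far (alternative decomposition, same cost).


-- ===== PORT A =====
-- the literal tuple `preferred`
def preferredA : List String :=
  ["title", "document_name", "policy_name", "policy", "name", "id"]

-- `for key in preferred: if key in lowered: return lowered[key]`
def scanA (keys : List String) (lowered : PySem.Dict String String) : Option String :=
  match keys with
  | [] => none
  | k :: ks =>
    match lowered.get? k with
    | some v => some v
    | none => scanA ks lowered

def select_title_column_py (fieldnames : List String) : Option String :=
  let lowered : PySem.Dict String String :=
    fieldnames.foldl (fun d name => d.insert (PySem.Str.lower name) name) PySem.Dict.empty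
  scanA preferredA lowered

-- ===== PORT B =====
-- rank = {key: i for i, key in enumerate(preferred)}
def rankB : PySem.Dict String Int :=
  PySem.Dict.ofList [("title", 0), ("document_name", 1), ("policy_name", 2),
                     ("policy", 3), ("name", 4), ("id", 5)]

-- loop body: r = rank.get(name.lower()); if r is not None and r <= best_rank: update
def stepB (st : Int × Option String) (name : String) : Int × Option String :=
  match rankB.get? (PySem.Str.lower name) with
  | some r => if r ≤ st.1 then (r, some name) else st
  | none => st

def select_title_column_py_alt (fieldnames : List String) : Option String :=
  (fieldnames.foldl stepB (6, none)).2

-- ===== PRECONDITION & SPEC =====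
def Spec_select_title_column_py (fieldnames : List String) (out : Option String) : Prop := out = select_title_column_py_alt fieldnames
instance (fieldnames : List String) (out : Option String) : Decidable (Spec_select_title_column_py fieldnames out) := by unfold Spec_select_title_column_py; infer_instance

-- ===== CLAIM (what is proved, stated in full; the proofs are below) =====
def Claim_equal_select_title_column_py : Prop := ∀ (fieldnames : List String), Dom_select_title_column_py fieldnames → Spec_select_title_column_py fieldnames (select_title_column_py fieldnames)

-- ===== LEMMAS AND PROOFS =====

-- Invariant linking A's dict to B's (best_rank, best_name) state, stated for any key list:
-- scanning `keys` in `d` finds `n`, and `r` is the offset of the first hit (|keys| if none).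
def InvGo : List String → PySem.Dict String String → Int → Option String → Prop
  | [], _, r, n => r = 0 ∧ n = none
  | k :: ks, d, r, n =>
    match d.get? k with
    | some v => r = 0 ∧ n = some v
    | none => 1 ≤ r ∧ InvGo ks d (r - 1) n

theorem invGo_nonneg (keys : List String) (d : PySem.Dict String String)
    (r : Int) (n : Option String) (h : InvGo keys d r n) : 0 ≤ r := by
  induction keys generalizing r with
  | nil => simp [InvGo] at h; omega
  | cons k ks ih =>
    simp only [InvGo] at h
    cases hk : d.get? k with
    | some v => rw [hk] at h; omega
    | none => rw [hk] at h; have := ih (r - 1) h.2; omega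

theorem invGo_scanA (keys : List String) (d : PySem.Dict String String)
    (r : Int) (n : Option String) (h : InvGo keys d r n) : scanA keys d = n := by
  induction keys generalizing r with
  | nil => simpa [InvGo, scanA] using h.2.symm
  | cons k ks ih =>
    simp only [InvGo] at h
    cases hk : d.get? k with
    | some v => rw [hk] at h; simp [scanA, hk, h.2]
    | none => rw [hk] at h; simp [scanA, hk]; exact ih (r - 1) h.2

-- rank lookup equals the index of the key in `preferredA`, generically in the key list
theorem invGo_step (keys : List String) (hnd : keys.Nodup)
    (d : PySem.Dict String String) (f l : String)
    (r : Int) (n : Option String) (h : InvGo keys d r n) :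
    InvGo keys (d.insert l f)
      (match PySem.List.index? keys l with
       | some i => if (i : Int) ≤ r then ((i : Int), some f) else (r, n)
       | none => (r, n)).1
      (match PySem.List.index? keys l with
       | some i => if (i : Int) ≤ r then ((i : Int), some f) else (r, n)
       | none => (r, n)).2 := by
  induction keys generalizing r n with
  | nil =>
    rw [(PySem.List.index?_eq_none_iff [] l).mpr (by simp)]
    simpa [InvGo] using h
  | cons k ks ih =>
    by_cases hl : k = l
    · subst hl
      rw [PySem.List.index?_cons_self k ks]
      have hr : 0 ≤ r := invGo_nonneg _ _ _ _ h
      simp only [Nat.cast_zero, if_pos hr]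
      simp [InvGo, PySem.Dict.get?_insert_self]
    · rw [PySem.List.index?_cons_of_ne ks hl]
      simp only [InvGo] at h
      have hget : (d.insert l f).get? k = d.get? k :=
        PySem.Dict.get?_insert_of_ne d f hl
      cases hk : d.get? k with
      | some v =>
        rw [hk] at h
        simp only at h
        cases hi : PySem.List.index? ks l with
        | none => simp [InvGo, hget, hk, h.1, h.2]
        | some i =>
          have hr0 : r = 0 := h.1
          simp only [Option.map_some]
          rw [if_neg (by push_cast; omega)]
          simp [InvGo, hget, hk, h.1, h.2]
      | none =>
        rw [hk] at h
        simp only at h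
        have hih := ih hnd.of_cons (r - 1) n h.2
        cases hi : PySem.List.index? ks l with
        | none =>
          rw [hi] at hih
          simp only [Option.map_none]
          simp only at hih
          simp [InvGo, hget, hk, h.1, hih]
        | some i =>
          rw [hi] at hih
          simp only at hih
          simp only [Option.map_some]
          by_cases hle : (i : Int) ≤ r - 1
          · rw [if_pos hle] at hih
            rw [if_pos (by push_cast; omega)]
            simp only [InvGo, hget, hk]
            have e : ((↑(i + 1) : Int)) - 1 = (i : Int) := by push_cast; ring
            rw [e]
            exact ⟨by push_cast; omega, hih⟩
          · rw [if_neg hle] at hih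
            rw [if_neg (by push_cast; omega)]
            simp only [InvGo, hget, hk]
            exact ⟨h.1, hih⟩

-- B's rank dict computes the index of the lowered name in `preferredA`
theorem rankB_get (l : String) :
    rankB.get? l =
      (match PySem.List.index? preferredA l with
       | some i => some ((i : Nat) : Int)
       | none => none) := by
  by_cases h0 : l = "title"; · subst h0; decide
  by_cases h1 : l = "document_name"; · subst h1; decide
  by_cases h2 : l = "policy_name"; · subst h2; decide
  by_cases h3 : l = "policy"; · subst h3; decide
  by_cases h4 : l = "name"; · subst h4; decide
  by_cases h5 : l = "id"; · subst h5; decide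
  have hrank : rankB = PySem.Dict.mk [("title", 0), ("document_name", 1), ("policy_name", 2),
      ("policy", 3), ("name", 4), ("id", 5)] := by decide
  have hmem : l ∉ preferredA := by
    simp [preferredA]
    exact ⟨h0, h1, h2, h3, h4, h5⟩
  rw [(PySem.List.index?_eq_none_iff preferredA l).mpr hmem, hrank]
  simp only [PySem.Dict.get?_mk_cons, beq_iff_eq, Ne.symm h0, Ne.symm h1, Ne.symm h2,
    Ne.symm h3, Ne.symm h4, Ne.symm h5, if_false]
  exact PySem.Dict.get?_empty l

theorem fold_inv (fs : List String) (d : PySem.Dict String String)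
    (st : Int × Option String) (h : InvGo preferredA d st.1 st.2) :
    InvGo preferredA
      (fs.foldl (fun d name => d.insert (PySem.Str.lower name) name) d)
      (fs.foldl stepB st).1 (fs.foldl stepB st).2 := by
  induction fs generalizing d st with
  | nil => exact h
  | cons f fs ih =>
    simp only [List.foldl_cons]
    apply ih
    have hstep := invGo_step preferredA (by decide) d f (PySem.Str.lower f) st.1 st.2 h
    have hB : stepB st f =
        (match PySem.List.index? preferredA (PySem.Str.lower f) with
         | some i => if (i : Int) ≤ st.1 then ((i : Int), some f) else (st.1, st.2)
         | none => (st.1, st.2)) := by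
      unfold stepB
      rw [rankB_get]
      cases PySem.List.index? preferredA (PySem.Str.lower f) <;> simp
    rw [hB]
    exact hstep

-- ===== VERDICT (by name: the statement is the Claim_ definition above) =====
theorem select_title_column_py_spec : Claim_equal_select_title_column_py := by
  intro fieldnames _
  unfold Spec_select_title_column_py select_title_column_py select_title_column_py_alt
  have hbase : InvGo preferredA PySem.Dict.empty (6 : Int) none := by
    norm_num [preferredA, InvGo, PySem.Dict.get?_empty]
  have h := fold_inv fieldnames PySem.Dict.empty (6, none) hbase
  exact invGo_scanA _ _ _ _ h
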